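-- pv_equiv track=rewrite | github.com/rkapur123/assorted_python_projects | project_3/image_shop.py | negate_green
-- ===== SOURCE A (Python) =====
-- def negate_green(rowArray, maxColorValue):#loop through the row Array
--     i = 0
--     newRowArray = []
--     for item in rowArray:
--         if((i-1)%3 == 0 or (i-1) == 0):
--             item = ((int(item)-int(maxColorValue)) * -1) # change G color value
--             newRowArray.append(item)
--         else:
--             newRowArray.append(item)  # append to new array
--         i = i +1
--
--     return newRowArray #return array
-- ===== SOURCE B (Python) =====
-- def negate_green(rowArray, maxColorValue):
--     # Process the row in pixel chunks of three (R, G, B): copy R, invert G, copy B.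
--     m = int(maxColorValue)
--     res = []
--     i = 0
--     n = len(rowArray)
--     while i < n:
--         res.append(rowArray[i])
--         if i + 1 < n:
--             res.append(m - int(rowArray[i + 1]))
--         if i + 2 < n:
--             res.append(rowArray[i + 2])
--         i += 3
--     return res
-- ===== Notes on version B (the rewrite author's own statement) =====
-- stated objective: simpler
-- what changed: B walks the row in fixed chunks of three (R,G,B), copying R and B and inverting G directly, instead of A's per-element loop that tests (i-1)%3 on every item; no per-item index/modulo bookkeeping.
import Mathlib
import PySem

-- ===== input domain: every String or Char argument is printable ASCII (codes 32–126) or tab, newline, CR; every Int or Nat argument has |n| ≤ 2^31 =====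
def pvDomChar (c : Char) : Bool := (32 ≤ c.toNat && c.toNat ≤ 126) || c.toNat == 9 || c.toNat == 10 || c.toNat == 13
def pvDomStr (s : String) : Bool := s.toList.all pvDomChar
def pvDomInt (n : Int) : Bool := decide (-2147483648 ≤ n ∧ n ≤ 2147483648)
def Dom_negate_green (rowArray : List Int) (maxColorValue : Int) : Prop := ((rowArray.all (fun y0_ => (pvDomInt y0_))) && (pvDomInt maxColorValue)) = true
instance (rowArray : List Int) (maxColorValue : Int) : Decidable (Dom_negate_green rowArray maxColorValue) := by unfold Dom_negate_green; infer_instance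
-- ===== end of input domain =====

-- B changes the decomposition: chunk-of-three recursion instead of A's index-mod test per element ('simpler').

-- ===== PORT A =====
-- loop body of A (the if on (i-1)%3, appending to newRowArray)
def negate_green_step (maxColorValue : Int) (st : Int × List Int) (item : Int) : Int × List Int :=
  let i := st.1
  let newRowArray := st.2
  if PySem.Int.mod (i - 1) 3 = 0 ∨ (i - 1) = 0 then
    (i + 1, newRowArray ++ [(item - maxColorValue) * (-1)])
  else
    (i + 1, newRowArray ++ [item])

def negate_green (rowArray : List Int) (maxColorValue : Int) : List Int :=
  (rowArray.foldl (negate_green_step maxColorValue) ((0 : Int), ([] : List Int))).2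

-- ===== PORT B =====
-- chunk-of-three walk: copy R, invert G, copy B, continue
def negate_green_go (m : Int) : List Int → List Int
  | [] => []
  | [r] => [r]
  | [r, g] => [r, m - g]
  | r :: g :: b :: rest => r :: (m - g) :: b :: negate_green_go m rest

def negate_green_alt (rowArray : List Int) (maxColorValue : Int) : List Int :=
  negate_green_go maxColorValue rowArray

-- ===== PRECONDITION & SPEC =====
def Spec_negate_green (rowArray : List Int) (maxColorValue : Int) (out : List Int) : Prop := out = negate_green_alt rowArray maxColorValue
instance (rowArray : List Int) (maxColorValue : Int) (out : List Int) : Decidable (Spec_negate_green rowArray maxColorValue out) := by unfold Spec_negate_green; infer_instance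

-- ===== CLAIM (what is proved, stated in full; the proofs are below) =====
def Claim_equal_negate_green : Prop := ∀ (rowArray : List Int) (maxColorValue : Int), Dom_negate_green rowArray maxColorValue → Spec_negate_green rowArray maxColorValue (negate_green rowArray maxColorValue)

-- ===== LEMMAS AND PROOFS =====

theorem pymod3 (a : Int) : PySem.Int.mod a 3 = a % 3 := by
  simp [PySem.Int.mod, Int.fmod_eq_emod]

theorem negate_green_step_pos (m i : Int) (acc : List Int) (item : Int) (h : i % 3 = 1) :
    negate_green_step m (i, acc) item = (i + 1, acc ++ [(item - m) * (-1)]) := by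
  unfold negate_green_step
  rw [if_pos]
  rw [pymod3]; omega

theorem negate_green_step_neg (m i : Int) (acc : List Int) (item : Int)
    (h : i % 3 ≠ 1) :
    negate_green_step m (i, acc) item = (i + 1, acc ++ [item]) := by
  unfold negate_green_step
  rw [if_neg]
  rw [pymod3]; omega

theorem negate_green_fold_inv (m : Int) (xs : List Int) :
    ∀ (i : Int) (acc : List Int), 0 ≤ i → i % 3 = 0 →
    (xs.foldl (negate_green_step m) (i, acc)).2 = acc ++ negate_green_go m xs := by
  induction xs using negate_green_go.induct with
  | case1 => intro i acc _ _; simp [negate_green_go]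
  | case2 r =>
      intro i acc hi hm
      rw [List.foldl_cons, negate_green_step_neg m i acc r (by omega), List.foldl_nil]
      simp [negate_green_go]
  | case3 r g =>
      intro i acc hi hm
      rw [List.foldl_cons, negate_green_step_neg m i acc r (by omega),
          List.foldl_cons, negate_green_step_pos m (i + 1) _ g (by omega), List.foldl_nil]
      simp [negate_green_go]
  | case4 r g b rest ih =>
      intro i acc hi hm
      rw [List.foldl_cons, negate_green_step_neg m i acc r (by omega),
          List.foldl_cons, negate_green_step_pos m (i + 1) _ g (by omega),
          List.foldl_cons, negate_green_step_neg m (i + 1 + 1) _ b (by omega)]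
      rw [show i + 1 + 1 + 1 = i + 3 by ring,
          ih (i + 3) _ (by omega) (by omega)]
      simp [negate_green_go]

-- ===== VERDICT (by name: the statement is the Claim_ definition above) =====
theorem negate_green_spec : Claim_equal_negate_green := by
  intro rowArray maxColorValue _
  unfold Spec_negate_green negate_green negate_green_alt
  simpa using negate_green_fold_inv maxColorValue rowArray 0 [] le_rfl (by decide)
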